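-- pv_equiv track=rewrite | github.com/DominikWolek/aoc_2025 | day_11/solution.py | solve
-- ===== SOURCE A (Python) =====
-- def solve(to_check, input):
--     result = 0
--     for path in to_check:
--         paths_cnt = 1
--
--         for i in range(len(path) - 1):
--             start = path[i]
--             end = path[i + 1]
--             paths = {(end, end): 1}
--             for x in path:
--                 if x != start and x != end:
--                     paths[(x, end)] = 0
--             fill_paths(start, end, input, paths)
--             paths_cnt *= paths[(start, end)]
--         result += paths_cnt
--
--     return result
--
-- def fill_paths(start, end, conns, paths):
--     end_paths = 0
--     for out in conns.get(start, []):
--         if (out, end) not in paths: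
--             paths = fill_paths(out, end, conns, paths)
--         end_paths += paths[(out, end)]
--
--     paths[(start, end)] = end_paths
--     return paths
-- ===== SOURCE B (Python) =====
-- def solve(to_check, input):
--     conns = dict(input)
--     items = list(conns.items())
--     result = 0
--     for path in to_check:
--         paths_cnt = 1
--         for start, end in zip(path, path[1:]):
--             outs = conns.get(start, [])
--             if not outs:
--                 paths_cnt = 0
--                 continue
--             blocked = [x for x in path if x != start and x != end]
--
--             def val(x, vals):
--                 if x == end:
--                     return 1
--                 if x in blocked:
--                     return 0
--                 return vals.get(x, 0)
--
--             vals = {}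
--             for _ in range(len(items)):
--                 new = {v: sum(val(out, vals) for out in outs)
--                        for v, outs in items}
--                 if new == vals:
--                     break
--                 vals = new
--             paths_cnt *= sum(val(out, vals) for out in outs)
--         result += paths_cnt
--     return result
-- ===== Notes on version B (the rewrite author's own statement) =====
-- stated objective: alternative
-- what changed: Replaces A's memoized recursive DFS (fill_paths mutating a shared memo dict) by a bottom-up dynamic program: per waypoint pair, a value table over the graph keys is recomputed by relaxation rounds until it stops changing (at most len(items) rounds, with the pair's end node fixed at 1 and blocked waypoints at 0) and the pair's count is read off the converged table; consecutive pairs are drawn with zip instead of index arithmetic.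
import Mathlib
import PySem

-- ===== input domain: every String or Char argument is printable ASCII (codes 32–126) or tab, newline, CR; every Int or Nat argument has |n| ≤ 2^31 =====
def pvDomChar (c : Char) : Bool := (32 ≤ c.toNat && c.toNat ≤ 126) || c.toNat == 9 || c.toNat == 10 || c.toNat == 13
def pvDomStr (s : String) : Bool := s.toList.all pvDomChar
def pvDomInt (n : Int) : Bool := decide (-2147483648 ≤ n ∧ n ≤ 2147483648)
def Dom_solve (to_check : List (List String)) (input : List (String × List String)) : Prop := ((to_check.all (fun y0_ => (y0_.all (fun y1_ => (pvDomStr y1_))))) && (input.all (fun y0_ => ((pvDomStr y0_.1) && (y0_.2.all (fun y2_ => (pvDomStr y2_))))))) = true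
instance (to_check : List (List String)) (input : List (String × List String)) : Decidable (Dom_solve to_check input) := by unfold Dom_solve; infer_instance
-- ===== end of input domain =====

-- B replaces A's memoized recursive DFS by an iterative rounds-of-relaxation dynamic program
-- (same results, similar cost; objective: alternative algorithm, not speed).

-- ===== PORT A =====
-- fill_paths, with a fuel counter as the totality guard (Python's recursion has no fuel;
-- under Pre_solve the fuel provided by `solve` below is never exhausted).
def fillPaths (fuel : Nat) (start finish : String) (conns : PySem.Dict String (List String))
    (paths : PySem.Dict (String × String) Int) :
    Option (PySem.Dict (String × String) Int) :=
  match fuel with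
  | 0 => none
  | fuel + 1 =>
    match (conns.getD start []).foldl
        (fun acc out =>
          match acc with
          | none => none
          | some (p, s) =>
            match (if p.contains (out, finish) then some p
                   else fillPaths fuel out finish conns p) with
            | none => none
            | some p => some (p, s + p.getD (out, finish) 0))
        (some (paths, (0 : Int))) with
    | none => none
    | some (p, s) => some (p.insert (start, finish) s)

def solve (to_check : List (List String)) (input : List (String × List String)) : Int :=
  let conns := PySem.Dict.ofList input
  to_check.foldl
    (fun result path =>
      result +
        (PySem.List.pyRange 0 (PySem.List.len path - 1) 1).foldl
          (fun paths_cnt i =>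
            let start := PySem.List.pyGetD path i ""
            let finish := PySem.List.pyGetD path (i + 1) ""
            let paths0 := (PySem.Dict.empty.insert (finish, finish) (1 : Int))
            let paths1 := path.foldl
              (fun p x => if x ≠ start ∧ x ≠ finish then p.insert (x, finish) 0 else p)
              paths0
            -- fuel input.length + 2 suffices under Pre_solve; .getD are totality guards only
            let paths2 := (fillPaths (input.length + 2) start finish conns paths1).getD paths1
            paths_cnt * paths2.getD (start, finish) 0)
          1)
    0

-- ===== PORT B =====
def valB (finish : String) (blocked : List String) (vals : PySem.Dict String Int)
    (x : String) : Int :=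
  if x = finish then 1 else if x ∈ blocked then 0 else vals.getD x 0

def roundsB (items : List (String × List String)) (finish : String) (blocked : List String) :
    Nat → PySem.Dict String Int → PySem.Dict String Int
  | 0, vals => vals
  | r + 1, vals =>
      -- `new == vals` in Python compares dicts as maps; both tables are comprehensions over
      -- `items` in its order (or empty), so Lean's order-sensitive Dict equality coincides
      let new := PySem.Dict.ofList
        (items.map (fun p => (p.1, (p.2.map (valB finish blocked vals)).sum)))
      if new = vals then vals else roundsB items finish blocked r new

def solve_alt (to_check : List (List String)) (input : List (String × List String)) : Int :=
  let conns := PySem.Dict.ofList input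
  let items := conns.items
  to_check.foldl
    (fun result path =>
      result +
        (path.zip path.tail).foldl
          (fun paths_cnt se =>
            let outs := conns.getD se.1 []
            if outs = [] then 0
            else
              let blocked := path.filter (fun x => decide (x ≠ se.1 ∧ x ≠ se.2))
              let vals := roundsB items se.2 blocked items.length PySem.Dict.empty
              paths_cnt * (outs.map (valB se.2 blocked vals)).sum)
          1)
    0

-- ===== PRECONDITION & SPEC =====
-- okRank conns finish blocked k v: node v is eliminated within k rounds of iteratively
-- deleting nodes all of whose successors are already deleted, where the finish node and the
-- blocked waypoints count as already deleted (they are leaves of A's recursion: its memo is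
-- seeded with them, so fill_paths never recurses into them).
def okRank (conns : PySem.Dict String (List String)) (finish : String) (blocked : List String) :
    Nat → String → Bool
  | 0, v => v == finish || blocked.contains v || !(conns.contains v)
  | k + 1, v =>
      okRank conns finish blocked k v ||
        (conns.contains v &&
          (conns.getD v []).all (fun out => okRank conns finish blocked k out))

-- Pre_solve: for every consecutive waypoint pair of every checked path, every successor of the
-- pair's start node is eliminable by the layering above (end/blocked nodes are leaves).
-- This excludes exactly the inputs on which A's recursion runs forever around a reachable
-- cycle not cut by the pair's end/blocked nodes, i.e. where A raises RecursionError.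
def Pre_solve (to_check : List (List String)) (input : List (String × List String)) : Prop :=
  ∀ path ∈ to_check, ∀ pr ∈ path.zip path.tail,
    ∀ out ∈ (PySem.Dict.ofList input).getD pr.1 [],
      okRank (PySem.Dict.ofList input) pr.2
        (path.filter (fun x => decide (x ≠ pr.1 ∧ x ≠ pr.2)))
        (PySem.Dict.ofList input).items.length out = true
instance (to_check : List (List String)) (input : List (String × List String)) :
    Decidable (Pre_solve to_check input) := by unfold Pre_solve; infer_instance

def pvWitness_solve : List (List String) × (List (String × List String)) :=
  ([["a", "b"]], [("a", ["b"])])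

def Spec_solve (to_check : List (List String)) (input : List (String × List String)) (out : Int) : Prop := out = solve_alt to_check input
instance (to_check : List (List String)) (input : List (String × List String)) (out : Int) : Decidable (Spec_solve to_check input out) := by unfold Spec_solve; infer_instance

-- ===== CLAIM (what is proved, stated in full; the proofs are below) =====
def Claim_equal_solve : Prop := ∀ (to_check : List (List String)) (input : List (String × List String)), Dom_solve to_check input → Pre_solve to_check input → Spec_solve to_check input (solve to_check input)

-- ===== LEMMAS AND PROOFS =====

-- the pure (unmemoized, fueled) path-count value both programs compute
def valF (conns : PySem.Dict String (List String)) (finish : String) (blocked : List String) :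
    Nat → String → Int
  | 0, _ => 0
  | f + 1, x =>
      if x = finish then 1
      else if x ∈ blocked then 0
      else ((conns.getD x []).map (valF conns finish blocked f)).sum

def Vv (conns : PySem.Dict String (List String)) (finish : String) (blocked : List String)
    (x : String) : Int :=
  valF conns finish blocked (conns.items.length + 1) x

def sumV (conns : PySem.Dict String (List String)) (finish : String) (blocked : List String)
    (x : String) : Int :=
  ((conns.getD x []).map (Vv conns finish blocked)).sum

lemma okRank_mono (conns : PySem.Dict String (List String)) (finish : String)
    (blocked : List String) (k : Nat) (x : String)
    (h : okRank conns finish blocked k x = true) :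
    okRank conns finish blocked (k + 1) x = true := by
  simp [okRank, h]

lemma okRank_succ_out (conns : PySem.Dict String (List String)) (finish : String)
    (blocked : List String) (k : Nat) (x : String)
    (hc : conns.contains x = true) (hxf : x ≠ finish) (hxb : x ∉ blocked)
    (h : okRank conns finish blocked (k + 1) x = true) :
    ∀ out ∈ conns.getD x [], okRank conns finish blocked k out = true := by
  induction k generalizing x with
  | zero =>
    intro out hout
    rw [show okRank conns finish blocked (0+1) x = _ from rfl] at h
    simp only [okRank, hc, Bool.true_and] at h
    rcases (Bool.or_eq_true _ _).mp h with h' | h'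
    · simp [hxf, hxb] at h'
    · exact List.all_eq_true.mp h' out hout
  | succ k ih =>
    intro out hout
    have heq : okRank conns finish blocked (k+1+1) x = (okRank conns finish blocked (k+1) x ||
        (conns.contains x &&
          (conns.getD x []).all (fun out => okRank conns finish blocked (k+1) out))) := rfl
    rw [heq] at h
    simp only [Bool.or_eq_true, Bool.and_eq_true] at h
    rcases h with h1 | ⟨_, hall⟩
    · exact okRank_mono conns finish blocked k out (ih x hc hxf hxb h1 out hout)
    · exact List.all_eq_true.mp hall out hout

lemma valF_stab (conns : PySem.Dict String (List String)) (finish : String)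
    (blocked : List String) :
    ∀ (k : Nat) (x : String) (f g : Nat), okRank conns finish blocked k x = true →
      k + 1 ≤ f → k + 1 ≤ g →
      valF conns finish blocked f x = valF conns finish blocked g x := by
  intro k
  induction k with
  | zero =>
    intro x f g hok hf hg
    obtain ⟨f', rfl⟩ : ∃ f', f = f' + 1 := ⟨f - 1, by omega⟩
    obtain ⟨g', rfl⟩ : ∃ g', g = g' + 1 := ⟨g - 1, by omega⟩
    by_cases hxf : x = finish
    · simp [valF, hxf]
    · by_cases hxb : x ∈ blocked
      · simp [valF, hxf, hxb]
      · have hc : conns.contains x = false := by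
          have : (x == finish || blocked.contains x || !(conns.contains x)) = true := hok
          simpa [hxf, hxb] using this
        simp [valF, hxf, hxb, PySem.Dict.getD_of_not_contains conns _ hc]
  | succ k ih =>
    intro x f g hok hf hg
    have heq : okRank conns finish blocked (k+1) x = (okRank conns finish blocked k x ||
        (conns.contains x &&
          (conns.getD x []).all (fun out => okRank conns finish blocked k out))) := rfl
    rw [heq] at hok
    simp only [Bool.or_eq_true, Bool.and_eq_true] at hok
    rcases hok with h1 | ⟨_, hall⟩
    · exact ih x f g h1 (by omega) (by omega)
    · obtain ⟨f', rfl⟩ : ∃ f', f = f' + 1 := ⟨f - 1, by omega⟩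
      obtain ⟨g', rfl⟩ : ∃ g', g = g' + 1 := ⟨g - 1, by omega⟩
      simp only [valF]
      split_ifs with h1' h2'
      · rfl
      · rfl
      · congr 1
        apply List.map_congr_left
        intro out hout
        exact ih out f' g' (List.all_eq_true.mp hall out hout) (by omega) (by omega)

lemma Vv_finish (conns : PySem.Dict String (List String)) (finish : String)
    (blocked : List String) : Vv conns finish blocked finish = 1 := by
  simp [Vv, valF]

lemma Vv_blocked (conns : PySem.Dict String (List String)) (finish : String)
    (blocked : List String) (x : String) (hx : x ≠ finish) (hb : x ∈ blocked) :
    Vv conns finish blocked x = 0 := by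
  simp [Vv, valF, hx, hb]

lemma Vv_nonkey (conns : PySem.Dict String (List String)) (finish : String)
    (blocked : List String) (x : String) (hc : conns.contains x = false)
    (hx : x ≠ finish) (hb : x ∉ blocked) : Vv conns finish blocked x = 0 := by
  simp [Vv, valF, hx, hb, PySem.Dict.getD_of_not_contains conns _ hc]

lemma Vv_unfold (conns : PySem.Dict String (List String)) (finish : String)
    (blocked : List String) (k : Nat) (x : String) (hk : k ≤ conns.items.length)
    (hok : okRank conns finish blocked k x = true) (hx : x ≠ finish) (hb : x ∉ blocked) :
    Vv conns finish blocked x = sumV conns finish blocked x := by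
  have h1 : Vv conns finish blocked x = valF conns finish blocked (k + 2) x :=
    valF_stab conns finish blocked k x _ _ hok (by omega) (by omega)
  have h2 : valF conns finish blocked (k + 2) x = (if x = finish then 1
      else if x ∈ blocked then 0
      else ((conns.getD x []).map (valF conns finish blocked (k + 1))).sum) := rfl
  rw [h1, h2]
  simp only [hx, hb, if_false, sumV]
  by_cases hc : conns.contains x = true
  · rcases Nat.eq_zero_or_pos k with rfl | hkpos
    · exfalso
      have : (x == finish || blocked.contains x || !(conns.contains x)) = true := hok
      simp [hx, hb, hc] at this
    · obtain ⟨k', rfl⟩ : ∃ k', k = k' + 1 := ⟨k - 1, by omega⟩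
      have hsucc := okRank_succ_out conns finish blocked k' x hc hx hb hok
      congr 1
      apply List.map_congr_left
      intro out hout
      have := valF_stab conns finish blocked k' out (k' + 2) (conns.items.length + 1)
        (hsucc out hout) (by omega) (by omega)
      simpa [Vv] using this
  · have hc' : conns.contains x = false := by simpa using hc
    simp [PySem.Dict.getD_of_not_contains conns _ hc']

-- invariant of A's memo dictionary
def InvP (conns : PySem.Dict String (List String)) (finish : String) (blocked : List String)
    (paths : PySem.Dict (String × String) Int) : Prop :=
  (∀ y e c, paths.get? (y, e) = some c → e = finish ∧ c = Vv conns finish blocked y) ∧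
  paths.contains (finish, finish) = true ∧
  (∀ y ∈ blocked, paths.contains (y, finish) = true)

def FillConc (conns : PySem.Dict String (List String)) (finish : String)
    (blocked : List String) (fuel : Nat) (x : String)
    (paths : PySem.Dict (String × String) Int) : Prop :=
  ∃ p', fillPaths fuel x finish conns paths = some p' ∧
    p'.get? (x, finish) = some (sumV conns finish blocked x) ∧
    (∀ y e c, p'.get? (y, e) = some c →
      e = finish ∧ (c = Vv conns finish blocked y ∨ (y = x ∧ c = sumV conns finish blocked x))) ∧
    (∀ q, paths.contains q = true → p'.contains q = true)

lemma fill_loop (conns : PySem.Dict String (List String)) (finish : String)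
    (blocked : List String) (k fuel : Nat) (hk : k ≤ conns.items.length)
    (IH : ∀ x paths, okRank conns finish blocked k x = true → x ≠ finish → x ∉ blocked →
      InvP conns finish blocked paths → FillConc conns finish blocked fuel x paths) :
    ∀ (outs : List String) (acc : Int) (paths : PySem.Dict (String × String) Int),
      (∀ out ∈ outs, okRank conns finish blocked k out = true) →
      InvP conns finish blocked paths →
      ∃ p', outs.foldl
          (fun acc out =>
            match acc with
            | none => none
            | some (p, s) =>
              match (if p.contains (out, finish) then some p
                     else fillPaths fuel out finish conns p) with
              | none => none
              | some p => some (p, s + p.getD (out, finish) 0))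
          (some (paths, acc)) =
          some (p', acc + (outs.map (Vv conns finish blocked)).sum) ∧
        InvP conns finish blocked p' ∧
        (∀ q, paths.contains q = true → p'.contains q = true) := by
  intro outs
  induction outs with
  | nil =>
    intro acc paths hall hinv
    exact ⟨paths, by simp, hinv, fun q h => h⟩
  | cons out rest ih =>
    intro acc paths hall hinv
    have hokout : okRank conns finish blocked k out = true := hall out (by simp)
    rw [List.foldl_cons]
    by_cases hc : paths.contains (out, finish) = true
    · obtain ⟨c, hget⟩ : ∃ c, paths.get? (out, finish) = some c := by
        rw [PySem.Dict.contains_eq_isSome_get?] at hc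
        exact Option.isSome_iff_exists.mp hc
      have hcV : c = Vv conns finish blocked out := (hinv.1 out finish c hget).2
      have hstep :
          (match (if paths.contains (out, finish) then some paths
                  else fillPaths fuel out finish conns paths) with
            | none => none
            | some p => some (p, acc + p.getD (out, finish) 0)) =
            some (paths, acc + Vv conns finish blocked out) := by
        rw [if_pos hc]
        show some (paths, acc + paths.getD (out, finish) 0) = _
        rw [PySem.Dict.getD_of_get?_eq_some paths 0 hget, hcV]
      simp only [hstep]
      obtain ⟨p', hrun, hinv', hmono⟩ :=
        ih (acc + Vv conns finish blocked out) paths (fun o ho => hall o (by simp [ho])) hinv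
      refine ⟨p', ?_, hinv', hmono⟩
      rw [hrun]
      simp [add_assoc]
    · have hc' : paths.contains (out, finish) = false := by simpa using hc
      have hnf : out ≠ finish := by
        intro h; rw [h] at hc'; rw [hinv.2.1] at hc'; simp at hc'
      have hnb : out ∉ blocked := by
        intro h; rw [hinv.2.2 out h] at hc'; simp at hc'
      obtain ⟨p1, hfill, hget1, hP2, hmono1⟩ := IH out paths hokout hnf hnb hinv
      have hVeq : Vv conns finish blocked out = sumV conns finish blocked out :=
        Vv_unfold conns finish blocked k out hk hokout hnf hnb
      have hinv1 : InvP conns finish blocked p1 := by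
        refine ⟨?_, hmono1 _ hinv.2.1, fun y hy => hmono1 _ (hinv.2.2 y hy)⟩
        intro y e c hgy
        obtain ⟨he, hcase⟩ := hP2 y e c hgy
        refine ⟨he, ?_⟩
        rcases hcase with h | ⟨rfl, rfl⟩
        · exact h
        · exact hVeq.symm
      have hstep :
          (match (if paths.contains (out, finish) then some paths
                  else fillPaths fuel out finish conns paths) with
            | none => none
            | some p => some (p, acc + p.getD (out, finish) 0)) =
            some (p1, acc + Vv conns finish blocked out) := by
        rw [if_neg (by simp [hc']), hfill]
        show some (p1, acc + p1.getD (out, finish) 0) = _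
        rw [PySem.Dict.getD_of_get?_eq_some p1 0 hget1, hVeq]
      simp only [hstep]
      obtain ⟨p', hrun, hinv', hmono⟩ :=
        ih (acc + Vv conns finish blocked out) p1 (fun o ho => hall o (by simp [ho])) hinv1
      refine ⟨p', ?_, hinv', fun q hq => hmono q (hmono1 q hq)⟩
      rw [hrun]
      simp [add_assoc]

lemma fill_ok (conns : PySem.Dict String (List String)) (finish : String)
    (blocked : List String) :
    ∀ (k : Nat), k ≤ conns.items.length →
    ∀ (x : String) (fuel : Nat) (paths : PySem.Dict (String × String) Int),
      okRank conns finish blocked k x = true → x ≠ finish → x ∉ blocked →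
      k + 1 ≤ fuel → InvP conns finish blocked paths →
      FillConc conns finish blocked fuel x paths := by
  intro k
  induction k with
  | zero =>
    intro hk x fuel paths hok hxf hxb hfuel hinv
    obtain ⟨f, rfl⟩ : ∃ f, fuel = f + 1 := ⟨fuel - 1, by omega⟩
    have hc : conns.contains x = false := by
      have : (x == finish || blocked.contains x || !(conns.contains x)) = true := hok
      simpa [hxf, hxb] using this
    have e1 : conns.getD x [] = [] := PySem.Dict.getD_of_not_contains conns _ hc
    have hrun : fillPaths (f + 1) x finish conns paths = some (paths.insert (x, finish) 0) := by
      simp only [fillPaths, e1, List.foldl_nil]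
    have hsum : sumV conns finish blocked x = 0 := by simp [sumV, e1]
    refine ⟨paths.insert (x, finish) 0, hrun, ?_, ?_, ?_⟩
    · rw [PySem.Dict.get?_insert_self, hsum]
    · intro y e c h
      rw [PySem.Dict.get?_insert] at h
      split_ifs at h with hye
      · injection hye with hy he
        refine ⟨he, Or.inr ⟨hy, ?_⟩⟩
        rw [hsum]; injection h with h'; exact h'.symm
      · exact ⟨(hinv.1 y e c h).1, Or.inl (hinv.1 y e c h).2⟩
    · intro q hq
      rw [PySem.Dict.contains_insert]
      simp [hq]
  | succ k ih =>
    intro hk x fuel paths hok hxf hxb hfuel hinv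
    have heq : okRank conns finish blocked (k + 1) x = (okRank conns finish blocked k x ||
        (conns.contains x &&
          (conns.getD x []).all (fun out => okRank conns finish blocked k out))) := rfl
    rw [heq] at hok
    simp only [Bool.or_eq_true, Bool.and_eq_true] at hok
    rcases hok with h1 | ⟨hc, hall⟩
    · exact ih (by omega) x fuel paths h1 hxf hxb (by omega) hinv
    · obtain ⟨f, rfl⟩ : ∃ f, fuel = f + 1 := ⟨fuel - 1, by omega⟩
      have IH' : ∀ y paths', okRank conns finish blocked k y = true → y ≠ finish →
          y ∉ blocked → InvP conns finish blocked paths' →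
          FillConc conns finish blocked f y paths' :=
        fun y p hy hyf hyb hp => ih (by omega) y f p hy hyf hyb (by omega) hp
      obtain ⟨p', hrun, hinv', hmono⟩ :=
        fill_loop conns finish blocked k f (by omega) IH' (conns.getD x []) 0 paths
          (fun o ho => List.all_eq_true.mp hall o ho) hinv
      have hrun' : fillPaths (f + 1) x finish conns paths =
          some (p'.insert (x, finish) (sumV conns finish blocked x)) := by
        simp only [fillPaths]
        rw [hrun]
        show some (p'.insert (x, finish) (0 + (List.map (Vv conns finish blocked) (conns.getD x [])).sum)) = _
        rw [zero_add]
        rfl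
      refine ⟨p'.insert (x, finish) (sumV conns finish blocked x), hrun', ?_, ?_, ?_⟩
      · rw [PySem.Dict.get?_insert_self]
      · intro y e c h
        rw [PySem.Dict.get?_insert] at h
        split_ifs at h with hye
        · injection hye with hy he
          refine ⟨he, Or.inr ⟨hy, ?_⟩⟩
          injection h with h'; exact h'.symm
        · exact ⟨(hinv'.1 y e c h).1, Or.inl (hinv'.1 y e c h).2⟩
      · intro q hq
        rw [PySem.Dict.contains_insert]
        simp [hmono q hq]

-- top-level call of fill_paths: A recurses into start's successors unconditionally, so only
-- the successors need a rank (start itself may be the finish node, e.g. on a path ["a","a"])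
lemma fill_top (conns : PySem.Dict String (List String)) (finish : String)
    (blocked : List String) (x : String) (fuel : Nat)
    (paths : PySem.Dict (String × String) Int)
    (houts : ∀ out ∈ conns.getD x [],
      okRank conns finish blocked conns.items.length out = true)
    (hfuel : conns.items.length + 2 ≤ fuel) (hinv : InvP conns finish blocked paths) :
    ∃ p', fillPaths fuel x finish conns paths = some p' ∧
      p'.get? (x, finish) = some (sumV conns finish blocked x) := by
  obtain ⟨f, rfl⟩ : ∃ f, fuel = f + 1 := ⟨fuel - 1, by omega⟩
  have IH' : ∀ y paths', okRank conns finish blocked conns.items.length y = true →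
      y ≠ finish → y ∉ blocked → InvP conns finish blocked paths' →
      FillConc conns finish blocked f y paths' :=
    fun y p hy hyf hyb hp =>
      fill_ok conns finish blocked conns.items.length (le_refl _) y f p hy hyf hyb
        (by omega) hp
  obtain ⟨p', hrun, _, _⟩ :=
    fill_loop conns finish blocked conns.items.length f (le_refl _) IH'
      (conns.getD x []) 0 paths houts hinv
  have hrun' : fillPaths (f + 1) x finish conns paths =
      some (p'.insert (x, finish) (sumV conns finish blocked x)) := by
    simp only [fillPaths]
    rw [hrun]
    show some (p'.insert (x, finish) (0 + (List.map (Vv conns finish blocked) (conns.getD x [])).sum)) = _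
    rw [zero_add]
    rfl
  exact ⟨_, hrun', by rw [PySem.Dict.get?_insert_self]⟩

lemma items_ofList_of_nodup {κ ν : Type} [BEq κ] [LawfulBEq κ] (L : List (κ × ν))
    (h : (L.map Prod.fst).Nodup) : (PySem.Dict.ofList L).items = L := by
  have := PySem.Dict.items_foldl_insert_fresh L Prod.fst Prod.snd PySem.Dict.empty (by simp) h
  simpa [PySem.Dict.ofList, PySem.Dict.update] using this

-- invariant of B's value table after r rounds
def GoodVals (conns : PySem.Dict String (List String)) (finish : String)
    (blocked : List String) (r : Nat) (vals : PySem.Dict String Int) : Prop :=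
  (∀ x, vals.contains x = true → conns.contains x = true) ∧
  (∀ x, conns.contains x = true → okRank conns finish blocked r x = true →
    x ≠ finish → x ∉ blocked → vals.getD x 0 = Vv conns finish blocked x)

lemma round_good (conns : PySem.Dict String (List String)) (finish : String)
    (blocked : List String) (s : Nat) (vals : PySem.Dict String Int)
    (hnd : conns.keys.Nodup)
    (hs : s + 1 ≤ conns.items.length) (hg : GoodVals conns finish blocked s vals) :
    GoodVals conns finish blocked (s + 1)
      (PySem.Dict.ofList (conns.items.map
        (fun p => (p.1, (p.2.map (valB finish blocked vals)).sum)))) := by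
  set L := conns.items.map (fun p => (p.1, (p.2.map (valB finish blocked vals)).sum)) with hL
  have hfst : L.map Prod.fst = conns.items.map Prod.fst := by
    simp [hL, List.map_map, Function.comp]
  have hnd' : conns.items.map Prod.fst = conns.keys := rfl
  have hndL : (L.map Prod.fst).Nodup := by rw [hfst, hnd']; exact hnd
  have hitems : (PySem.Dict.ofList L).items = L := items_ofList_of_nodup L hndL
  have hkeysL : (PySem.Dict.ofList L).keys = conns.keys := by
    show (PySem.Dict.ofList L).items.map Prod.fst = _
    rw [hitems, hfst, hnd']
  constructor
  · intro x hcx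
    rw [PySem.Dict.contains_iff_mem_keys] at hcx ⊢
    rwa [hkeysL] at hcx
  · intro x hcx hok hxf hxb
    obtain ⟨pr, hpr, hprx⟩ : ∃ pr ∈ conns.items, pr.1 = x := by
      rw [PySem.Dict.contains_iff_mem_keys] at hcx
      rw [← hnd'] at hcx
      obtain ⟨pr, hpr, hx⟩ := List.mem_map.mp hcx
      exact ⟨pr, hpr, hx⟩
    obtain ⟨outs, rfl⟩ : ∃ outs, pr = (x, outs) := ⟨pr.2, by rw [← hprx]⟩
    have hgetx : conns.get? x = some outs := PySem.Dict.get?_of_mem_items conns hpr hnd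
    have hgetDx : conns.getD x [] = outs := PySem.Dict.getD_of_get?_eq_some conns [] hgetx
    have hmemL : (x, (outs.map (valB finish blocked vals)).sum) ∈ L := by
      rw [hL]
      exact List.mem_map.mpr ⟨(x, outs), hpr, rfl⟩
    have hndK : (PySem.Dict.ofList L).keys.Nodup := by rw [hkeysL]; exact hnd
    have hmemL' : (x, (outs.map (valB finish blocked vals)).sum) ∈ (PySem.Dict.ofList L).items := by
      rw [hitems]; exact hmemL
    have hgd := PySem.Dict.getD_of_mem_items (PySem.Dict.ofList L) hmemL' hndK (d0 := 0)
    rw [hgd]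
    have hsucc := okRank_succ_out conns finish blocked s x hcx hxf hxb hok
    rw [hgetDx] at hsucc
    have hcong : outs.map (valB finish blocked vals) = outs.map (Vv conns finish blocked) := by
      apply List.map_congr_left
      intro out hout
      have hokout := hsucc out hout
      by_cases hof : out = finish
      · simp [valB, hof, Vv_finish]
      · by_cases hob : out ∈ blocked
        · simp [valB, hof, hob, Vv_blocked conns finish blocked out hof hob]
        · simp only [valB, hof, hob, if_false]
          by_cases hoc : conns.contains out = true
          · exact hg.2 out hoc hokout hof hob
          · have hoc' : conns.contains out = false := by simpa using hoc
            have hvc : vals.contains out = false := by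
              by_cases hv : vals.contains out = true
              · rw [hg.1 out hv] at hoc'; simp at hoc'
              · simpa using hv
            rw [PySem.Dict.getD_of_not_contains vals _ hvc,
              Vv_nonkey conns finish blocked out hoc' hof hob]
    rw [hcong]
    have := Vv_unfold conns finish blocked (s + 1) x hs hok hxf hxb
    rw [this, sumV, hgetDx]

lemma roundsB_good (conns : PySem.Dict String (List String)) (finish : String)
    (blocked : List String) (hnd : conns.keys.Nodup) :
    ∀ (r s : Nat) (vals : PySem.Dict String Int), s + r ≤ conns.items.length →
      GoodVals conns finish blocked s vals →
      GoodVals conns finish blocked (s + r)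
        (roundsB conns.items finish blocked r vals) := by
  intro r
  induction r with
  | zero => intro s vals _ hg; exact hg
  | succ r ih =>
    intro s vals hle hg
    by_cases hfix : PySem.Dict.ofList (conns.items.map
        (fun p => (p.1, (p.2.map (valB finish blocked vals)).sum))) = vals
    · have heq : roundsB conns.items finish blocked (r + 1) vals = vals := by
        show (let new := PySem.Dict.ofList (conns.items.map
            (fun p => (p.1, (p.2.map (valB finish blocked vals)).sum)));
          if new = vals then vals else roundsB conns.items finish blocked r new) = vals
        simp only [hfix, if_pos]
      rw [heq]
      -- a fixpoint of the round map is good at every rank up to the bound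
      have hfixgood : ∀ (k : Nat), s + k ≤ conns.items.length →
          GoodVals conns finish blocked (s + k) vals := by
        intro k
        induction k with
        | zero => intro _; exact hg
        | succ k ihk =>
          intro hk
          have h1 := round_good conns finish blocked (s + k) vals hnd (by omega)
            (ihk (by omega))
          rw [hfix] at h1
          have he : s + k + 1 = s + (k + 1) := by omega
          rwa [he] at h1
      exact hfixgood (r + 1) hle
    · have heq : roundsB conns.items finish blocked (r + 1) vals =
          roundsB conns.items finish blocked r
            (PySem.Dict.ofList (conns.items.map
              (fun p => (p.1, (p.2.map (valB finish blocked vals)).sum)))) := by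
        show (let new := PySem.Dict.ofList (conns.items.map
            (fun p => (p.1, (p.2.map (valB finish blocked vals)).sum)));
          if new = vals then vals else roundsB conns.items finish blocked r new) =
          roundsB conns.items finish blocked r _
        simp only [hfix, if_false]
      rw [heq]
      have h1 := round_good conns finish blocked s vals hnd (by omega) hg
      have h2 := ih (s + 1) _ (by omega) h1
      have : s + (r + 1) = s + 1 + r := by omega
      rw [this]
      exact h2

lemma seed_aux (conns : PySem.Dict String (List String)) (start finish : String)
    (path : List String) :
    ∀ (l : List String), (∀ x ∈ l, x ∈ path) →
    ∀ (p0 : PySem.Dict (String × String) Int),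
      (∀ y e c, p0.get? (y, e) = some c →
        e = finish ∧ c = Vv conns finish (path.filter (fun x => decide (x ≠ start ∧ x ≠ finish))) y) →
      (∀ y e c, (l.foldl (fun p x => if x ≠ start ∧ x ≠ finish then p.insert (x, finish) 0 else p) p0).get? (y, e) = some c →
        e = finish ∧ c = Vv conns finish (path.filter (fun x => decide (x ≠ start ∧ x ≠ finish))) y) ∧
      (∀ q, p0.contains q = true →
        (l.foldl (fun p x => if x ≠ start ∧ x ≠ finish then p.insert (x, finish) 0 else p) p0).contains q = true) ∧
      (∀ y ∈ l, y ≠ start → y ≠ finish →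
        (l.foldl (fun p x => if x ≠ start ∧ x ≠ finish then p.insert (x, finish) 0 else p) p0).contains (y, finish) = true) := by
  intro l
  induction l with
  | nil =>
    intro _ p0 h1
    exact ⟨h1, fun q h => h, by simp⟩
  | cons x l ih =>
    intro hmem p0 h1
    rw [List.foldl_cons]
    by_cases hcond : x ≠ start ∧ x ≠ finish
    · rw [if_pos hcond]
      have h1' : ∀ y e c, (p0.insert (x, finish) 0).get? (y, e) = some c →
          e = finish ∧ c = Vv conns finish (path.filter (fun x => decide (x ≠ start ∧ x ≠ finish))) y := by
        intro y e c h
        rw [PySem.Dict.get?_insert] at h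
        split_ifs at h with hye
        · injection hye with hy he
          refine ⟨he, ?_⟩
          injection h with h'
          rw [← h', hy]
          refine (Vv_blocked conns finish _ x hcond.2 ?_).symm
          exact List.mem_filter.mpr ⟨hmem x (by simp), by simpa using hcond⟩
        · exact h1 y e c h
      obtain ⟨c1, c2, c3⟩ := ih (fun z hz => hmem z (by simp [hz])) (p0.insert (x, finish) 0) h1'
      refine ⟨c1, ?_, ?_⟩
      · intro q hq
        apply c2
        rw [PySem.Dict.contains_insert]
        simp [hq]
      · intro y hy hys hyf
        rcases List.mem_cons.mp hy with rfl | hy'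
        · apply c2
          exact PySem.Dict.contains_insert_self _ _ _
        · exact c3 y hy' hys hyf
    · rw [if_neg hcond]
      obtain ⟨c1, c2, c3⟩ := ih (fun z hz => hmem z (by simp [hz])) p0 h1
      refine ⟨c1, c2, ?_⟩
      intro y hy hys hyf
      rcases List.mem_cons.mp hy with rfl | hy'
      · exact absurd ⟨hys, hyf⟩ hcond
      · exact c3 y hy' hys hyf

lemma size_ofList_le {κ ν : Type} [BEq κ] (L : List (κ × ν)) :
    (PySem.Dict.ofList L).items.length ≤ L.length := by
  suffices h : ∀ (M : List (κ × ν)) (d : PySem.Dict κ ν),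
      (d.update M).items.length ≤ d.items.length + M.length by
    have h0 : (PySem.Dict.empty : PySem.Dict κ ν).items.length = 0 := rfl
    have := h L PySem.Dict.empty
    rw [h0] at this
    simpa [PySem.Dict.ofList] using this
  intro M
  induction M with
  | nil => intro d; simp [PySem.Dict.update]
  | cons p M ih =>
    intro d
    have heq : d.update (p :: M) = (d.insert p.1 p.2).update M := rfl
    rw [heq]
    have h2 := ih (d.insert p.1 p.2)
    have h3 : (d.insert p.1 p.2).items.length ≤ d.items.length + 1 := by
      have hs := PySem.Dict.size_insert d p.1 p.2
      have hsz : ∀ (e : PySem.Dict κ ν), e.size = e.items.length := fun e => rfl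
      rw [hsz, hsz] at hs
      split_ifs at hs <;> omega
    simp only [List.length_cons]
    omega

lemma zip_tail_eq (path : List String) :
    (List.range (path.length - 1)).map (fun k => (path.getD k "", path.getD (k + 1) "")) =
      path.zip path.tail := by
  induction path with
  | nil => simp
  | cons a t ih =>
    cases t with
    | nil => simp
    | cons b t' =>
      have hlen : (a :: b :: t').length - 1 = t'.length + 1 := by simp
      rw [hlen, List.range_succ_eq_map, List.map_cons, List.map_map]
      have hlen' : (b :: t').length - 1 = t'.length := by simp
      rw [hlen'] at ih
      show ((a :: b :: t').getD 0 "", (a :: b :: t').getD 1 "") ::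
          (List.range t'.length).map
            ((fun k => ((a :: b :: t').getD k "", (a :: b :: t').getD (k + 1) "")) ∘ Nat.succ) =
        (a, b) :: (b :: t').zip t'
      simp only [List.tail_cons] at ih
      rw [← ih]
      refine congrArg₂ List.cons rfl ?_
      apply List.map_congr_left
      intro k hk
      simp [Function.comp]

lemma A_pair (input : List (String × List String)) (path : List String) (start finish : String)
    (houts : ∀ out ∈ (PySem.Dict.ofList input).getD start [],
      okRank (PySem.Dict.ofList input) finish
        (path.filter (fun x => decide (x ≠ start ∧ x ≠ finish)))
        (PySem.Dict.ofList input).items.length out = true) :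
    ((fillPaths (input.length + 2) start finish (PySem.Dict.ofList input)
        (path.foldl (fun p x => if x ≠ start ∧ x ≠ finish then p.insert (x, finish) 0 else p)
          (PySem.Dict.empty.insert (finish, finish) 1))).getD
        (path.foldl (fun p x => if x ≠ start ∧ x ≠ finish then p.insert (x, finish) 0 else p)
          (PySem.Dict.empty.insert (finish, finish) 1))).getD (start, finish) 0 =
      sumV (PySem.Dict.ofList input) finish
        (path.filter (fun x => decide (x ≠ start ∧ x ≠ finish))) start := by
  set conns := PySem.Dict.ofList input with hconns
  set blockedL := path.filter (fun x => decide (x ≠ start ∧ x ≠ finish)) with hbl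
  have h1 : ∀ y e c, (PySem.Dict.empty.insert (finish, finish) (1 : Int)).get? (y, e) = some c →
      e = finish ∧ c = Vv conns finish blockedL y := by
    intro y e c h
    rw [PySem.Dict.get?_insert] at h
    split_ifs at h with hye
    · injection hye with hy he
      injection h with h'
      refine ⟨he, ?_⟩
      rw [← h', hy, Vv_finish]
    · rw [PySem.Dict.get?_empty] at h
      exact absurd h (by simp)
  obtain ⟨c1, c2, c3⟩ := seed_aux conns start finish path path (fun x hx => hx) _ h1
  have hinv : InvP conns finish blockedL
      (path.foldl (fun p x => if x ≠ start ∧ x ≠ finish then p.insert (x, finish) 0 else p)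
        (PySem.Dict.empty.insert (finish, finish) 1)) := by
    refine ⟨c1, c2 _ (PySem.Dict.contains_insert_self _ _ _), ?_⟩
    intro y hy
    rw [hbl, List.mem_filter] at hy
    have hcond : y ≠ start ∧ y ≠ finish := by simpa using hy.2
    exact c3 y hy.1 hcond.1 hcond.2
  have hsz : conns.items.length ≤ input.length := size_ofList_le input
  obtain ⟨p', hrun, hget⟩ :=
    fill_top conns finish blockedL start (input.length + 2) _ houts (by omega) hinv
  rw [hrun]
  show p'.getD (start, finish) 0 = _
  rw [PySem.Dict.getD_of_get?_eq_some p' 0 hget]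

lemma valB_correct (conns : PySem.Dict String (List String)) (finish : String)
    (blocked : List String) (vals : PySem.Dict String Int) (r : Nat)
    (hg : GoodVals conns finish blocked r vals) (out : String)
    (hko : conns.contains out = true → okRank conns finish blocked r out = true) :
    valB finish blocked vals out = Vv conns finish blocked out := by
  by_cases hof : out = finish
  · simp [valB, hof, Vv_finish]
  · by_cases hob : out ∈ blocked
    · simp [valB, hof, hob, Vv_blocked conns finish blocked out hof hob]
    · simp only [valB, hof, hob, if_false]
      by_cases hoc : conns.contains out = true
      · exact hg.2 out hoc (hko hoc) hof hob
      · have hoc' : conns.contains out = false := by simpa using hoc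
        have hvc : vals.contains out = false := by
          by_cases hv : vals.contains out = true
          · rw [hg.1 out hv] at hoc'; simp at hoc'
          · simpa using hv
        rw [PySem.Dict.getD_of_not_contains vals _ hvc,
          Vv_nonkey conns finish blocked out hoc' hof hob]

lemma B_pair (input : List (String × List String)) (path : List String) (start finish : String)
    (houts : ∀ out ∈ (PySem.Dict.ofList input).getD start [],
      okRank (PySem.Dict.ofList input) finish
        (path.filter (fun x => decide (x ≠ start ∧ x ≠ finish)))
        (PySem.Dict.ofList input).items.length out = true) :
    (((PySem.Dict.ofList input).getD start []).map
        (valB finish (path.filter (fun x => decide (x ≠ start ∧ x ≠ finish)))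
          (roundsB (PySem.Dict.ofList input).items finish
            (path.filter (fun x => decide (x ≠ start ∧ x ≠ finish)))
            (PySem.Dict.ofList input).items.length PySem.Dict.empty))).sum =
      sumV (PySem.Dict.ofList input) finish
        (path.filter (fun x => decide (x ≠ start ∧ x ≠ finish))) start := by
  set conns := PySem.Dict.ofList input with hconns
  set blockedL := path.filter (fun x => decide (x ≠ start ∧ x ≠ finish)) with hbl
  have hnd : conns.keys.Nodup := PySem.Dict.nodup_keys_ofList input
  have good0 : GoodVals conns finish blockedL 0 PySem.Dict.empty := by
    constructor
    · intro x hx; rw [PySem.Dict.contains_empty] at hx; exact absurd hx (by simp)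
    · intro x hcx hok0 hxf hxb
      have : (x == finish || blockedL.contains x || !(conns.contains x)) = true := hok0
      simp [hxf, hxb, hcx] at this
  have goodn := roundsB_good conns finish blockedL hnd conns.items.length 0
    PySem.Dict.empty (by omega) good0
  rw [zero_add] at goodn
  rw [sumV]
  apply congrArg
  apply List.map_congr_left
  intro out hout
  exact valB_correct conns finish blockedL _ conns.items.length goodn out
    (fun _ => houts out hout)

-- ===== VERDICT (by name: the statement is the Claim_ definition above) =====
theorem solve_spec : Claim_equal_solve := by
  unfold Claim_equal_solve
  intro to_check input _ hpre
  unfold Spec_solve solve solve_alt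
  simp only []
  apply PySem.List.foldl_congr_mem
  intro acc path hmem
  apply congrArg
  -- inner folds over the consecutive pairs agree
  cases path with
  | nil =>
    rw [PySem.List.pyRange_one_eq_nil (by simp [PySem.List.len_eq])]
    simp
  | cons a t =>
    have h1 : PySem.List.len (a :: t) - 1 = ((t.length : Nat) : Int) := by
      simp [PySem.List.len_eq]
    have hzip : (a :: t).zip (a :: t).tail =
        (List.range t.length).map
          (fun k => ((a :: t).getD k "", (a :: t).getD (k + 1) "")) := by
      have := (zip_tail_eq (a :: t)).symm
      rwa [show (a :: t).length - 1 = t.length from by simp] at this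
    rw [h1, PySem.List.pyRange_zero_natCast, hzip, List.foldl_map, List.foldl_map]
    apply PySem.List.foldl_congr_mem
    intro c k hk
    have e1 : PySem.List.pyGetD (a :: t) (k : Int) "" = (a :: t).getD k "" :=
      PySem.List.pyGetD_natCast (a :: t) k ""
    have e2 : PySem.List.pyGetD (a :: t) ((k : Int) + 1) "" = (a :: t).getD (k + 1) "" := by
      have h3 : ((k : Int) + 1) = ((k + 1 : Nat) : Int) := by push_cast; ring
      rw [h3, PySem.List.pyGetD_natCast]
    simp only [e1, e2]
    have hprmem : ((a :: t).getD k "", (a :: t).getD (k + 1) "") ∈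
        (a :: t).zip (a :: t).tail := by
      rw [hzip]
      exact List.mem_map.mpr ⟨k, hk, rfl⟩
    have houts := hpre (a :: t) hmem _ hprmem
    rw [A_pair input (a :: t) ((a :: t).getD k "") ((a :: t).getD (k + 1) "") houts]
    by_cases houts0 : (PySem.Dict.ofList input).getD ((a :: t).getD k "") ([] : List String) = []
    · rw [if_pos houts0]
      rw [show sumV (PySem.Dict.ofList input) ((a :: t).getD (k + 1) "")
          ((a :: t).filter (fun x => decide (x ≠ (a :: t).getD k "" ∧ x ≠ (a :: t).getD (k + 1) "")))
          ((a :: t).getD k "") = 0 from by rw [sumV, houts0]; simp]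
      rw [mul_zero]
    · rw [if_neg houts0]
      rw [B_pair input (a :: t) ((a :: t).getD k "") ((a :: t).getD (k + 1) "") houts]
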